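-- pv_equiv track=rewrite | github.com/ImJiyun/Algorithm | 백준/Silver/1213. 팰린드롬 만들기/팰린드롬 만들기.py | make_palindrom
-- ===== SOURCE A (Python) =====
-- from collections import defaultdict
--
-- def make_palindrom(s):
--     cnt = defaultdict(int)
--     odd_cnt = 0
--     odd_chr = ''
--
--     for ch in s:
--         cnt[ch] += 1
--
--     for ch in cnt:
--         if cnt[ch] % 2 == 1:
--             odd_cnt += 1
--             odd_chr = ch
--
--     if odd_cnt > 1:
--         return "I'm Sorry Hansoo"
--
--     l = len(s)
--     substr = ''
--     if l % 2 == 0: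
--         for ch in sorted(cnt):
--             substr += ch * (cnt[ch] // 2)
--         return substr + substr[::-1]
--     else:
--         for ch in sorted(cnt):
--             substr += ch * (cnt[ch] // 2)
--         return substr + odd_chr +  substr[::-1]
-- ===== SOURCE B (Python) =====
-- def make_palindrom(s):
--     t = sorted(s)
--     n = len(t)
--     half = []
--     mid = ''
--     i = 0
--     while i < n:
--         j = i
--         while j < n and t[j] == t[i]:
--             j += 1
--         run = j - i
--         half.append(t[i] * (run // 2))
--         if run % 2 == 1:
--             if mid:
--                 return "I'm Sorry Hansoo"
--             mid = t[i]
--         i = j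
--     h = ''.join(half)
--     return h + mid + h[::-1]
-- ===== Notes on version B (the rewrite author's own statement) =====
-- stated objective: alternative
-- what changed: Replaces the frequency-dict (two key passes plus a sorted-keys build) with a single run-length scan over the sorted characters that accumulates the half-string and bails out on a second odd-length run.
import Mathlib
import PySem

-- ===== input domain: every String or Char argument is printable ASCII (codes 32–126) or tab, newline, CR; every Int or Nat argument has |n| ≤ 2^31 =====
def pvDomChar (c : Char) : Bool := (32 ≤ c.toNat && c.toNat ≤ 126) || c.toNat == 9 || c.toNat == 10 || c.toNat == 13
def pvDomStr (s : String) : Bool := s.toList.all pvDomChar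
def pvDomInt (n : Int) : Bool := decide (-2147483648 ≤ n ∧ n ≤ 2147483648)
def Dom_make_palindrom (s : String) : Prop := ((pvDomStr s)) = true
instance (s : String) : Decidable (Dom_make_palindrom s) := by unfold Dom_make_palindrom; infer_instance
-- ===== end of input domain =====

-- B replaces A's frequency dict and separate odd-key/sorted-key passes by one run-length
-- scan over the sorted characters (objective: alternative decomposition, same cost).

-- ===== PORT A =====
-- A, step for step: build the character counter, count odd keys (remembering the last one),
-- bail out on >1 odd, else concatenate ch*(cnt//2) over the sorted keys and mirror.
def make_palindrom (s : String) : String :=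
  let L := s.toList
  let cnt := L.foldl (fun d ch => d.modify ch 0 (· + 1)) (PySem.Dict.empty : PySem.Dict Char Int)
  let st := cnt.keys.foldl
    (fun (p : Int × List Char) ch =>
      if PySem.Int.mod (cnt.getD ch 0) 2 = 1 then (p.1 + 1, [ch]) else p)
    (0, [])
  if st.1 > 1 then "I'm Sorry Hansoo"
  else
    let l : Int := L.length
    if PySem.Int.mod l 2 = 0 then
      let substr := (PySem.List.sorted cnt.keys (fun x => x) false).foldl
        (fun acc ch => acc ++ PySem.List.pyRepeat [ch] (PySem.Int.floordiv (cnt.getD ch 0) 2)) []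
      String.ofList (substr ++ substr.reverse)
    else
      let substr := (PySem.List.sorted cnt.keys (fun x => x) false).foldl
        (fun acc ch => acc ++ PySem.List.pyRepeat [ch] (PySem.Int.floordiv (cnt.getD ch 0) 2)) []
      String.ofList (substr ++ st.2 ++ substr.reverse)

-- ===== PORT B =====
-- B's while loop over the sorted list: peel one run of equal characters per step,
-- append run/2 copies to the half, record an odd run as the middle, fail on a second one.
def pvRuns (t : List Char) (half : List Char) (mid : Option Char) :
    Option (List Char × Option Char) :=
  match t with
  | [] => some (half, mid)
  | c :: rest =>
    let run := (rest.takeWhile (fun x => x == c)).length + 1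
    let half' := half ++ List.replicate (run / 2) c
    if run % 2 = 1 then
      match mid with
      | some _ => none
      | none => pvRuns (rest.dropWhile (fun x => x == c)) half' (some c)
    else pvRuns (rest.dropWhile (fun x => x == c)) half' mid
termination_by t.length
decreasing_by
  · exact Nat.lt_succ_of_le (List.length_dropWhile_le _ _)
  · exact Nat.lt_succ_of_le (List.length_dropWhile_le _ _)

def make_palindrom_alt (s : String) : String :=
  match pvRuns (PySem.List.sorted s.toList (fun x => x) false) [] none with
  | none => "I'm Sorry Hansoo"
  | some (h, mid) =>
    String.ofList (h ++ (match mid with | some c => [c] | none => []) ++ h.reverse)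

-- ===== PRECONDITION & SPEC =====
def Spec_make_palindrom (s : String) (out : String) : Prop := out = make_palindrom_alt s
instance (s : String) (out : String) : Decidable (Spec_make_palindrom s out) := by unfold Spec_make_palindrom; infer_instance

-- ===== CLAIM (what is proved, stated in full; the proofs are below) =====
def Claim_equal_make_palindrom : Prop := ∀ (s : String), Dom_make_palindrom s → Spec_make_palindrom s (make_palindrom s)

-- ===== LEMMAS AND PROOFS =====
def pvOdd (L : List Char) (c : Char) : Bool := L.count c % 2 == 1
def pvFlat (n : Char → Nat) (S : List Char) : List Char := S.flatMap (fun c => List.replicate (n c) c)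
def pvHalf (n : Char → Nat) (S : List Char) : List Char := S.flatMap (fun c => List.replicate (n c / 2) c)

theorem pv_mem_flat {n : Char → Nat} {S : List Char} {x : Char} (h : x ∈ pvFlat n S) : x ∈ S := by
  rcases List.mem_flatMap.mp h with ⟨c, hc, hx⟩
  rwa [List.eq_of_mem_replicate hx]

theorem pv_count_flat (n : Char → Nat) (S : List Char) (hnd : S.Nodup) (x : Char) :
    (pvFlat n S).count x = if x ∈ S then n x else 0 := by
  induction S with
  | nil => simp [pvFlat]
  | cons c S' ih =>
    have hnd' := hnd.of_cons
    have hcn : c ∉ S' := (List.nodup_cons.mp hnd).1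
    simp only [pvFlat, List.flatMap_cons, List.count_append, List.count_replicate]
    rw [show (S'.flatMap fun c => List.replicate (n c) c) = pvFlat n S' from rfl, ih hnd']
    by_cases hx : x = c
    · subst hx; simp [hcn]
    · simp [hx, Ne.symm hx, List.mem_cons]

theorem pv_pairwise_flat (n : Char → Nat) (S : List Char) (h : S.Pairwise (· < ·)) :
    (pvFlat n S).Pairwise (· ≤ ·) := by
  induction S with
  | nil => simp [pvFlat]
  | cons c S' ih =>
    simp only [pvFlat, List.flatMap_cons]
    apply List.pairwise_append.mpr
    refine ⟨?_, ih h.of_cons, ?_⟩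
    · exact List.pairwise_replicate.mpr (Or.inr le_rfl)
    · intro a ha b hb
      rw [List.eq_of_mem_replicate ha]
      exact le_of_lt ((List.pairwise_cons.mp h).1 _ (pv_mem_flat hb))

theorem pv_sorted_eq_flat (L : List Char) :
    PySem.List.sorted L (fun x => x) false =
      pvFlat (fun c => L.count c) (PySem.List.sorted (PySem.Set.ofList L) (fun x => x) false) := by
  set S := PySem.List.sorted (PySem.Set.ofList L) (fun x => x) false with hS
  have hlt : S.Pairwise (· < ·) := PySem.List.sorted_ofList_pairwise_lt L
  have hnd : S.Nodup := hlt.imp ne_of_lt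
  have hmem : ∀ c : Char, c ∈ S ↔ c ∈ L := by
    intro c
    rw [hS, PySem.List.mem_sorted, PySem.Set.mem_ofList]
  apply PySem.List.sorted_id_eq_of_perm_of_pairwise
  · apply List.perm_iff_count.mpr
    intro x
    rw [pv_count_flat _ _ hnd x]
    by_cases hx : x ∈ L
    · simp [(hmem x).mpr hx]
    · rw [if_neg (fun h => hx ((hmem x).mp h)), List.count_eq_zero.mpr hx]
  · exact pv_pairwise_flat _ _ hlt

theorem pv_takeDrop (c : Char) (u : List Char) (h : ∀ x ∈ u, x ≠ c) :
    ∀ m : Nat,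
      (List.replicate m c ++ u).takeWhile (fun x => x == c) = List.replicate m c ∧
      (List.replicate m c ++ u).dropWhile (fun x => x == c) = u := by
  intro m
  induction m with
  | zero =>
    simp only [List.replicate, List.nil_append]
    cases u with
    | nil => simp
    | cons y u' =>
      have : (y == c) = false := beq_eq_false_iff_ne.mpr (h y List.mem_cons_self)
      simp [this]
  | succ m ih =>
    simp only [List.replicate_succ, List.cons_append, List.takeWhile_cons, List.dropWhile_cons,
      beq_self_eq_true, if_true, ih]
    simp

theorem pv_runs_spec (n : Char → Nat) :
    ∀ (S : List Char), S.Pairwise (· < ·) → (∀ c ∈ S, 0 < n c) →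
    ∀ (half : List Char) (mid : Option Char),
      pvRuns (pvFlat n S) half mid =
        if 2 ≤ S.countP (fun c => n c % 2 == 1) + (if mid.isSome then 1 else 0) then none
        else some (half ++ pvHalf n S, (S.find? (fun c => n c % 2 == 1)).or mid) := by
  intro S
  induction S with
  | nil =>
    intro _ _ half mid
    cases mid <;> simp [pvFlat, pvHalf, pvRuns]
  | cons c S' ih =>
    intro hlt hpos half mid
    have hlt' := hlt.of_cons
    have hcS' : ∀ x ∈ S', c < x := (List.pairwise_cons.mp hlt).1
    have hne : ∀ x ∈ pvFlat n S', x ≠ c := fun x hx => ne_of_gt (hcS' x (pv_mem_flat hx))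
    have hp := hpos c List.mem_cons_self
    have hflat : pvFlat n (c :: S') = c :: (List.replicate (n c - 1) c ++ pvFlat n S') := by
      simp only [pvFlat, List.flatMap_cons]
      rw [show List.replicate (n c) c = c :: List.replicate (n c - 1) c by
        rw [← List.replicate_succ]; congr 1; omega]
      simp
    rw [hflat, pvRuns.eq_def]
    simp only []
    have htd := pv_takeDrop c (pvFlat n S') hne (n c - 1)
    rw [htd.1, htd.2]
    have hrun : (List.replicate (n c - 1) c).length + 1 = n c := by
      rw [List.length_replicate]; omega
    rw [hrun]
    by_cases hodd : n c % 2 = 1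
    · rw [if_pos hodd]
      cases mid with
      | some m =>
        simp only [Option.isSome_some, reduceIte]
        have hb : (n c % 2 == 1) = true := by simp [hodd]
        have hge : 2 ≤ (c :: S').countP (fun c => n c % 2 == 1) + 1 := by
          simp only [List.countP_cons, hb, reduceIte]
          omega
        rw [if_pos hge]
      | none =>
        simp only []
        rw [ih hlt' (fun c hc => hpos c (List.mem_cons_of_mem _ hc))]
        simp only [Option.isSome_some, Option.isSome_none, Bool.false_eq_true, reduceIte,
          Nat.add_zero]
        by_cases h2 : 2 ≤ S'.countP (fun c => n c % 2 == 1) + 1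
        · have hb : (n c % 2 == 1) = true := by simp [hodd]
          have h2' : 2 ≤ (c :: S').countP (fun c => n c % 2 == 1) := by
            simp only [List.countP_cons, hb, reduceIte]
            omega
          rw [if_pos h2, if_pos h2']
        · have hz : S'.countP (fun c => n c % 2 == 1) = 0 := by omega
          have hb : (n c % 2 == 1) = true := by simp [hodd]
          have h2' : ¬ 2 ≤ (c :: S').countP (fun c => n c % 2 == 1) := by
            simp only [List.countP_cons, hb, reduceIte]
            omega
          rw [if_neg h2, if_neg h2']
          have hfind : S'.find? (fun c => n c % 2 == 1) = none := by
            rw [List.find?_eq_none]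
            intro x hx
            exact List.countP_eq_zero.mp hz x hx
          have hfindc : (c :: S').find? (fun c => n c % 2 == 1) = some c := by
            rw [List.find?_cons_of_pos]
            simp [hodd]
          rw [hfind, hfindc]
          simp only [Option.or, pvHalf, List.flatMap_cons]
          rw [List.append_assoc]
    · rw [if_neg hodd]
      rw [ih hlt' (fun c hc => hpos c (List.mem_cons_of_mem _ hc))]
      have hcp : (c :: S').countP (fun c => n c % 2 == 1) = S'.countP (fun c => n c % 2 == 1) := by
        simp [hodd]
      have hfc : (c :: S').find? (fun c => n c % 2 == 1) = S'.find? (fun c => n c % 2 == 1) := by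
        rw [List.find?_cons_of_neg]
        simp [hodd]
      rw [hcp, hfc]
      by_cases h2 : 2 ≤ S'.countP (fun c => n c % 2 == 1) + (if mid.isSome then 1 else 0)
      · rw [if_pos h2, if_pos h2]
      · rw [if_neg h2, if_neg h2]
        simp only [pvHalf, List.flatMap_cons]
        rw [List.append_assoc]

theorem pv_foldA (p : Char → Prop) [DecidablePred p] :
    ∀ (K : List Char) (a : Int) (w : List Char),
      K.foldl (fun q ch => if p ch then (q.1 + 1, [ch]) else q) (a, w) =
        (a + (K.countP (fun c => decide (p c)) : Int),
         (K.filter (fun c => decide (p c))).foldl (fun _ c => [c]) w) := by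
  intro K
  induction K with
  | nil => intro a w; simp
  | cons ch K' ih =>
    intro a w
    by_cases h : p ch
    · simp only [List.foldl_cons, if_pos h, List.countP_cons, List.filter_cons,
        decide_eq_true h, reduceIte, ih]
      rw [Prod.mk.injEq]
      exact ⟨by push_cast; ring, rfl⟩
    · simp only [List.foldl_cons, if_neg h, List.countP_cons, List.filter_cons,
        decide_eq_false h, ih]
      simp

theorem pv_parity (n : Char → Nat) :
    ∀ S : List Char, (pvFlat n S).length % 2 = (S.countP (fun c => n c % 2 == 1)) % 2 := by
  intro S
  induction S with
  | nil => rfl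
  | cons c S' ih =>
    simp only [pvFlat, List.flatMap_cons, List.length_append, List.length_replicate,
      List.countP_cons]
    rw [show (S'.flatMap fun c => List.replicate (n c) c).length = (pvFlat n S').length from rfl]
    by_cases h : n c % 2 = 1
    · have hb : (n c % 2 == 1) = true := by simp [h]
      simp only [hb, reduceIte]
      omega
    · have hb : (n c % 2 == 1) = false := by simpa using h
      simp only [hb, Bool.false_eq_true, reduceIte]
      omega

theorem pv_main (s : String) : make_palindrom s = make_palindrom_alt s := by
  simp only [make_palindrom, make_palindrom_alt]
  rw [← PySem.Dict.counter_eq_foldl]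
  set L := s.toList with hL
  set S := PySem.List.sorted (PySem.Set.ofList L) (fun x => x) false with hSdef
  have hlt : S.Pairwise (· < ·) := PySem.List.sorted_ofList_pairwise_lt L
  have hmemS : ∀ c : Char, c ∈ S ↔ c ∈ L := by
    intro c; rw [hSdef, PySem.List.mem_sorted, PySem.Set.mem_ofList]
  have hpos : ∀ c ∈ S, 0 < L.count c := fun c hc => List.count_pos_iff.mpr ((hmemS c).mp hc)
  have hK : (PySem.Dict.counter L).keys = PySem.Set.ofList L := PySem.Dict.keys_counter L
  rw [hK]
  rw [pv_foldA (fun ch => PySem.Int.mod ((PySem.Dict.counter L).getD ch 0) 2 = 1)]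
  have hpd : (fun c => decide (PySem.Int.mod ((PySem.Dict.counter L).getD c 0) 2 = 1))
      = pvOdd L := by
    funext c
    have hm : PySem.Int.mod ((PySem.Dict.counter L).getD c 0) 2 = ((L.count c % 2 : Nat) : Int) := by
      rw [PySem.Dict.getD_counter]
      exact_mod_cast PySem.Int.mod_natCast (L.count c) 2
    simp only [hm, pvOdd]
    rcases Nat.mod_two_eq_zero_or_one (L.count c) with h | h <;> rw [h] <;> simp
  rw [hpd]
  have hperm : S.Perm (PySem.Set.ofList L) := PySem.List.sorted_perm _ _ _
  have hKP : (PySem.Set.ofList L).countP (pvOdd L) = S.countP (pvOdd L) :=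
    (hperm.countP_eq _).symm
  rw [hKP]
  -- the sorted-keys half-string of A is pvHalf
  have hsortK : PySem.List.sorted (PySem.Set.ofList L) (fun x => x) false = S := rfl
  rw [PySem.List.foldl_append_eq_flatMap]
  have hfun : (fun ch => PySem.List.pyRepeat [ch]
        (PySem.Int.floordiv ((PySem.Dict.counter L).getD ch 0) 2))
      = (fun ch => List.replicate (L.count ch / 2) ch) := by
    funext ch
    rw [PySem.Dict.getD_counter, PySem.List.pyRepeat_singleton]
    rw [show PySem.Int.floordiv ((L.count ch : Nat) : Int) 2 = ((L.count ch / 2 : Nat) : Int) from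
      by exact_mod_cast PySem.Int.floordiv_natCast (L.count ch) 2]
    rw [Int.toNat_natCast]
  rw [hfun]
  rw [show (S.flatMap fun ch => List.replicate (L.count ch / 2) ch)
      = pvHalf (fun c => L.count c) S from rfl]
  -- B side
  rw [show PySem.List.sorted L (fun x => x) false = pvFlat (fun c => L.count c) S from
    pv_sorted_eq_flat L]
  rw [pv_runs_spec (fun c => L.count c) S hlt hpos [] none]
  have hpodd : (fun c => L.count c % 2 == 1) = pvOdd L := rfl
  rw [hpodd]
  set oS := S.countP (pvOdd L) with hoS
  -- parity
  have hlen : L.length % 2 = oS % 2 := by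
    have h1 : (pvFlat (fun c => L.count c) S).length = L.length := by
      rw [← pv_sorted_eq_flat L]
      exact (PySem.List.sorted_perm _ _ _).length_eq
    have := pv_parity (fun c => L.count c) S
    rw [h1, hpodd] at this
    exact this
  simp only [Option.isSome_none, Bool.false_eq_true, reduceIte, Nat.add_zero]
  by_cases hbig : 2 ≤ oS
  · rw [if_pos hbig]
    have : (0 : Int) + (oS : Int) > 1 := by omega
    rw [if_pos this]
  · rw [if_neg hbig]
    have hsmall : (0 : Int) + (oS : Int) > 1 → False := by omega
    rw [if_neg hsmall]
    interval_cases oS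
    · -- no odd character: even length, no middle
      have hm0 : PySem.Int.mod ((L.length : Int)) 2 = 0 := by
        rw [show PySem.Int.mod ((L.length : Int)) 2 = ((L.length % 2 : Nat) : Int) from
          by exact_mod_cast PySem.Int.mod_natCast L.length 2]
        simp [hlen]
      rw [if_pos hm0]
      have hfind : S.find? (pvOdd L) = none :=
        List.find?_eq_none.mpr fun x hx => List.countP_eq_zero.mp hoS.symm x hx
      rw [hfind]
      simp
    · -- exactly one odd character: odd length, it is the middle
      have hm1 : ¬ PySem.Int.mod ((L.length : Int)) 2 = 0 := by
        rw [show PySem.Int.mod ((L.length : Int)) 2 = ((L.length % 2 : Nat) : Int) from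
          by exact_mod_cast PySem.Int.mod_natCast L.length 2]
        simp [hlen]
      rw [if_neg hm1]
      obtain ⟨c0, hc0⟩ : ∃ a, S.filter (pvOdd L) = [a] := by
        apply List.length_eq_one_iff.mp
        rw [← List.countP_eq_length_filter]
        omega
      have hKfil : (PySem.Set.ofList L).filter (pvOdd L) = [c0] := by
        apply List.perm_singleton.mp
        have := hperm.filter (pvOdd L)
        rw [hc0] at this
        exact this.symm
      have hfind : S.find? (pvOdd L) = some c0 := by
        rw [← List.head?_filter, hc0]
        rfl
      rw [hKfil, hfind]
      simp

-- ===== VERDICT (by name: the statement is the Claim_ definition above) =====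
theorem make_palindrom_spec : Claim_equal_make_palindrom := by
  intro s _
  unfold Spec_make_palindrom
  exact pv_main s
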